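-- pv_equiv track=rewrite | github.com/promptware/metaprompt | python/src/parse_utils.py | join_text_pieces
-- ===== SOURCE A (Python) =====
-- def join_text_pieces(children):
--     """Joins multiple consequent text chunks into one:
--     '[' 'foo' ']' -> '[foo]'
--     (workaround for generated parser implementation details)
--     """
--     # TODO: move this to visit_exprs
--     buf = None
--     res = []
--     for child in children:
--         if buf is None:
--             if child["type"] == "text":
--                 buf = child
--             else:
--                 res.append(child)
--         else:
--             if child["type"] == "text":
--                 buf["text"] += child["text"]
--             else:
--                 res.append(buf)
--                 buf = None
--                 res.append(child)
--     if buf is not None: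
--         res.append(buf)
--
--     return res
-- ===== SOURCE B (Python) =====
-- def join_text_pieces(children):
--     """Joins multiple consequent text chunks into one:
--     '[' 'foo' ']' -> '[foo]'
--     """
--     res = []
--     i = 0
--     n = len(children)
--     while i < n:
--         node = children[i]
--         if node["type"] != "text":
--             res.append(node)
--             i += 1
--             continue
--         j = i + 1
--         while j < n and children[j]["type"] == "text":
--             j += 1
--         if j > i + 1:
--             node["text"] = "".join(c["text"] for c in children[i:j])
--         res.append(node)
--         i = j
--     return res
-- ===== Notes on version B (the rewrite author's own statement) =====
-- stated objective: alternative
-- what changed: Replaces A's buf/res one-node-at-a-time state machine with a two-pointer run-grouping pass: each maximal run of text nodes is located first (inner scan), then its texts are joined in one ''.join and written into the run's first node; both versions mutate the argument's first text node of each run identically.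
import Mathlib
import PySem

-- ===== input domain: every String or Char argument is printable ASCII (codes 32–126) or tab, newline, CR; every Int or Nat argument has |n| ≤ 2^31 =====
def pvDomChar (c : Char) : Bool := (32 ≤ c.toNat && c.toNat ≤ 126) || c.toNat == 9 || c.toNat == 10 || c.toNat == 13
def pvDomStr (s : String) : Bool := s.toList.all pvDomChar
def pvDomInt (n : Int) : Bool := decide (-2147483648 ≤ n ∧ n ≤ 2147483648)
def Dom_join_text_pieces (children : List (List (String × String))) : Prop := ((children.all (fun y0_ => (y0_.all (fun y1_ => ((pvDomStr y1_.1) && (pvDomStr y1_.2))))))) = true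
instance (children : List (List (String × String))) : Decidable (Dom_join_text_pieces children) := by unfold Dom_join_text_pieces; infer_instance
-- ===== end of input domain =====

-- B replaces A's buf/res state machine by a two-pointer run-grouping pass (same cost); both
-- Pythons mutate the first text node of each run in place identically, the proof is about the
-- return value (which contains those mutated nodes).

-- ===== PORT A =====
-- assoc-list dict helpers (exact on Pre_: Python d[k] lookup = first match; d[k] = v overwrites in place)
def pvGetk (d : List (String × String)) (k : String) : Option String :=
  match d with
  | [] => none
  | (a, b) :: rest => if a == k then some b else pvGetk rest k

def pvGetD (d : List (String × String)) (k dflt : String) : String := (pvGetk d k).getD dflt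

def pvSetk (d : List (String × String)) (k v : String) : List (String × String) :=
  match d with
  | [] => [(k, v)]
  | (a, b) :: rest => if a == k then (a, v) :: rest else (a, b) :: pvSetk rest k v

def pvIsText (c : List (String × String)) : Bool := pvGetD c "type" "" == "text"

def pvJoinA (buf : Option (List (String × String))) (res : List (List (String × String))) :
    List (List (String × String)) → List (List (String × String))
  | [] => match buf with
          | none => res
          | some b => res ++ [b]
  | c :: rest =>
    match buf with
    | none =>
      if pvIsText c then pvJoinA (some c) res rest
      else pvJoinA none (res ++ [c]) rest
    | some b =>
      if pvIsText c then
        pvJoinA (some (pvSetk b "text" (pvGetD b "text" "" ++ pvGetD c "text" ""))) res rest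
      else pvJoinA none (res ++ [b, c]) rest

def join_text_pieces (children : List (List (String × String))) : List (List (String × String)) :=
  pvJoinA none [] children

-- ===== PORT B =====
-- joined text of a run (Python: "".join(c["text"] for c in run))
def pvJoinTexts (run : List (List (String × String))) : String :=
  (run.map (fun n => pvGetD n "text" "")).foldl (· ++ ·) ""

def pvGoB : List (List (String × String)) → List (List (String × String))
  | [] => []
  | c :: rest =>
    if pvIsText c then
      -- inner while: extend j over the maximal run of text nodes
      let run := rest.takeWhile pvIsText
      (if run.isEmpty then c else pvSetk c "text" (pvJoinTexts (c :: run)))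
        :: pvGoB (rest.dropWhile pvIsText)
    else c :: pvGoB rest
termination_by l => l.length
decreasing_by
  · have := (List.dropWhile_sublist (l := rest) (p := pvIsText)).length_le
    simp; omega
  · simp

def join_text_pieces_alt (children : List (List (String × String))) : List (List (String × String)) :=
  pvGoB children

-- ===== PRECONDITION & SPEC =====
-- Pre_ excludes exactly: nodes with no "type" key (Python A raises KeyError there), text nodes
-- adjacent to another text node but lacking a "text" key (A's merge raises KeyError there), and
-- inner lists with duplicate keys (not representable as a Python dict).
def Pre_join_text_pieces (children : List (List (String × String))) : Prop :=
  (∀ c ∈ children, "type" ∈ c.map Prod.fst ∧ List.Pairwise (fun a b => a.1 ≠ b.1) c) ∧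
  (∀ p ∈ children.zip children.tail, ("type", "text") ∈ p.1 → ("type", "text") ∈ p.2 →
      "text" ∈ p.1.map Prod.fst ∧ "text" ∈ p.2.map Prod.fst)
instance (children : List (List (String × String))) : Decidable (Pre_join_text_pieces children) := by
  unfold Pre_join_text_pieces; infer_instance

def pvWitness_join_text_pieces : (List (List (String × String))) :=
  [[("type", "text"), ("text", "[")], [("type", "text"), ("text", "foo")],
   [("type", "expr"), ("name", "x")], [("type", "text"), ("text", "]")]]

def Spec_join_text_pieces (children : List (List (String × String))) (out : List (List (String × String))) : Prop := out = join_text_pieces_alt children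
instance (children : List (List (String × String))) (out : List (List (String × String))) : Decidable (Spec_join_text_pieces children out) := by unfold Spec_join_text_pieces; infer_instance

-- ===== CLAIM (what is proved, stated in full; the proofs are below) =====
def Claim_equal_join_text_pieces : Prop := ∀ (children : List (List (String × String))), Dom_join_text_pieces children → Pre_join_text_pieces children → Spec_join_text_pieces children (join_text_pieces children)

-- ===== LEMMAS AND PROOFS =====

lemma pvGetk_setk (d : List (String × String)) (k v : String) :
    pvGetk (pvSetk d k v) k = some v := by
  induction d with
  | nil => simp [pvSetk, pvGetk]
  | cons h t ih =>
    obtain ⟨a, b⟩ := h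
    by_cases hak : a == k
    · simp [pvSetk, pvGetk, hak]
    · simp [pvSetk, pvGetk, hak, ih]

lemma pvSetk_setk (d : List (String × String)) (k v w : String) :
    pvSetk (pvSetk d k v) k w = pvSetk d k w := by
  induction d with
  | nil => simp [pvSetk]
  | cons h t ih =>
    obtain ⟨a, b⟩ := h
    by_cases hak : a == k
    · simp [pvSetk, hak]
    · simp [pvSetk, hak, ih]

lemma foldl_str_append (l : List String) (a b : String) :
    l.foldl (· ++ ·) (a ++ b) = a ++ l.foldl (· ++ ·) b := by
  induction l generalizing b with
  | nil => simp
  | cons h t ih => simpa [List.foldl, String.append_assoc] using ih (b ++ h)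

-- A's per-node accumulation over one run
def pvMergeA (b : List (String × String)) (run : List (List (String × String))) :
    List (String × String) :=
  run.foldl (fun acc c => pvSetk acc "text" (pvGetD acc "text" "" ++ pvGetD c "text" "")) b

lemma pvJoinTexts_cons (c : List (String × String)) (run : List (List (String × String))) :
    pvJoinTexts (c :: run) = pvGetD c "text" "" ++ pvJoinTexts run := by
  simp only [pvJoinTexts, List.map_cons, List.foldl_cons]
  have := foldl_str_append (run.map (fun n => pvGetD n "text" "")) (pvGetD c "text" "") ""
  simpa using this

lemma pvMergeA_setk (run : List (List (String × String))) (d : List (String × String)) (s : String) :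
    pvMergeA (pvSetk d "text" s) run = pvSetk d "text" (s ++ pvJoinTexts run) := by
  induction run generalizing s with
  | nil => simp [pvMergeA, pvJoinTexts]
  | cons c t ih =>
    simp only [pvMergeA, List.foldl_cons] at *
    rw [pvGetD, pvGetk_setk, pvSetk_setk]
    simp only [Option.getD_some]
    rw [ih, pvJoinTexts_cons, String.append_assoc]

lemma pvMergeA_eq (c : List (String × String)) (run : List (List (String × String))) :
    pvMergeA c run = if run.isEmpty then c else pvSetk c "text" (pvJoinTexts (c :: run)) := by
  cases run with
  | nil => simp [pvMergeA]
  | cons c0 rs =>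
    simp only [List.isEmpty_cons, if_neg, Bool.false_eq_true, not_false_iff]
    simp only [pvMergeA, List.foldl_cons]
    have h := pvMergeA_setk rs c (pvGetD c "text" "" ++ pvGetD c0 "text" "")
    simp only [pvMergeA] at h
    rw [h, pvJoinTexts_cons, pvJoinTexts_cons, String.append_assoc]

lemma pvJoinA_some (l : List (List (String × String))) (b : List (String × String))
    (res : List (List (String × String))) :
    pvJoinA (some b) res l
      = pvJoinA none (res ++ [pvMergeA b (l.takeWhile pvIsText)]) (l.dropWhile pvIsText) := by
  induction l generalizing b res with
  | nil => simp [pvJoinA, pvMergeA]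
  | cons c rest ih =>
    by_cases hc : pvIsText c
    · rw [pvJoinA, if_pos hc, ih]
      simp only [List.takeWhile_cons, hc, if_pos, List.dropWhile_cons]
      rfl
    · rw [pvJoinA, if_neg hc]
      simp only [List.takeWhile_cons, List.dropWhile_cons, hc, Bool.false_eq_true,
        ite_false]
      rw [pvJoinA, if_neg hc]
      simp [pvMergeA]

lemma pvJoinA_none (n : Nat) : ∀ (l : List (List (String × String))),
    l.length ≤ n → ∀ res, pvJoinA none res l = res ++ pvGoB l := by
  induction n with
  | zero =>
    intro l hl res
    have : l = [] := List.eq_nil_of_length_eq_zero (Nat.le_zero.mp hl)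
    subst this; simp [pvJoinA, pvGoB]
  | succ n ih =>
    intro l hl res
    cases l with
    | nil => simp [pvJoinA, pvGoB]
    | cons c rest =>
      simp only [List.length_cons, Nat.succ_le_succ_iff] at hl
      by_cases hc : pvIsText c
      · rw [pvJoinA, if_pos hc, pvJoinA_some]
        have hlen : (rest.dropWhile pvIsText).length ≤ n :=
          le_trans (List.dropWhile_sublist (l := rest) (p := pvIsText)).length_le hl
        rw [ih _ hlen]
        rw [pvGoB, if_pos hc]
        rw [pvMergeA_eq]
        simp
      · rw [pvJoinA, if_neg hc, ih rest hl, pvGoB, if_neg hc]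
        simp

-- ===== VERDICT (by name: the statement is the Claim_ definition above) =====
theorem join_text_pieces_spec : Claim_equal_join_text_pieces := by
  intro children _ _
  unfold Spec_join_text_pieces join_text_pieces join_text_pieces_alt
  simpa using pvJoinA_none children.length children le_rfl []
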